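-- pv_equiv track=rewrite | github.com/mrezzamoradi/Bioinformatics_Algorithms_Part1 | _211_Spectrum.py | generate_spectrum
-- ===== SOURCE A (Python) =====
-- def generate_spectrum(peptide, int_mw_table, cyclic=False):
--     """
--     Generates the spectrum of 'peptide'. 'peptide' can be either linear or cyclic. By defual it assumes the 'peptide'
--     to be linear ('cyclic'=False)
--
--     :param peptide:
--     :type peptide: tuple
--     :param int_mw_table:
--     :type int_mw_table: dict
--     :param cyclic:
--     :type cyclic: bool
--     :return:
--     :rtype: list
--
--     Sample Input:
--     NQEL
--
--     Sample Output:
--     Linear: 0 113 114 128 129 242 242 257 370 371 484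
--     Cyclic: 0 113 114 128 129 227 242 242 257 355 356 370 371 484
--     """
--     if type(peptide) == str:
--         peptide = tuple([int_mw_table[amino_acid] for amino_acid in peptide])
--
--     # An ascending list of cumulative masses from the first amino acid to the last amino acid in 'peptide'
--     prefix_mass = [0]
--     for amino_acid in peptide:
--         prefix_mass.append(prefix_mass[-1] + int(amino_acid))
--
--     # Total 'peptide' mass and length
--     peptide_mass = prefix_mass[-1]
--     peptide_length = len(peptide)
--
--     # Initiate spectrum
--     spectrum = [0]
--
--     for i in range(peptide_length):
--         for j in range(i + 1, peptide_length + 1):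
--             sequence_mass = prefix_mass[j] - prefix_mass[i]
--             spectrum.append(sequence_mass)
--
--             if cyclic and (i > 0) and (j < peptide_length):
--                 spectrum.append(peptide_mass - sequence_mass)
--
--     return spectrum
-- ===== SOURCE B (Python) =====
-- def generate_spectrum(peptide, int_mw_table, cyclic=False):
--     if type(peptide) == str:
--         peptide = tuple([int_mw_table[amino_acid] for amino_acid in peptide])
--
--     masses = [int(a) for a in peptide]
--     total = sum(masses)
--
--     def row(suffix, is_first):
--         # subpeptide masses starting at this suffix, via a running sum,
--         # each followed by its cyclic complement when applicable
--         out = []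
--         acc = 0
--         rest = suffix
--         while rest:
--             acc += rest[0]
--             rest = rest[1:]
--             out.append(acc)
--             if cyclic and not is_first and rest:
--                 out.append(total - acc)
--         return out
--
--     def rows(suffix, is_first):
--         if not suffix:
--             return []
--         return row(suffix, is_first) + rows(suffix[1:], False)
--
--     return [0] + rows(masses, True)
-- ===== Notes on version B (the rewrite author's own statement) =====
-- stated objective: alternative
-- what changed: B replaces A's prefix-mass table and index-range double loop by a recursion over the suffixes of the mass list, emitting each start row with a running-sum accumulator (overall the spectrum is built as a concatenation of per-start rows instead of appends into one flat index loop).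
import Mathlib
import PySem

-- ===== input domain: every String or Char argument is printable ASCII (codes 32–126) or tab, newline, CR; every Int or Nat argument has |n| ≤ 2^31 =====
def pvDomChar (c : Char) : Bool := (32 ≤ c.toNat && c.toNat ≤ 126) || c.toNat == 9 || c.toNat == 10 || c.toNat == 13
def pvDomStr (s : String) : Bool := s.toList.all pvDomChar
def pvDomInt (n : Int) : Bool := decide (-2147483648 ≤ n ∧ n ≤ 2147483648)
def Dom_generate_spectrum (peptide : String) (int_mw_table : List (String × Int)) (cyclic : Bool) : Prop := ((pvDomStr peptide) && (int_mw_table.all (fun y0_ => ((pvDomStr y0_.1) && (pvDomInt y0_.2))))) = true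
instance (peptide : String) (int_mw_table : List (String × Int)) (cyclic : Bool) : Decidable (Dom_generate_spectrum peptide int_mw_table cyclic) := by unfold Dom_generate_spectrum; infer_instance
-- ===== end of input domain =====

-- B replaces A's prefix-mass table and index double loop by a recursion over the suffixes
-- of the mass list with a running-sum accumulator (return-value equivalence).

-- shared helper: the Python dict lookup int_mw_table[amino_acid] (first match; a missing
-- key is a KeyError in both Pythons and is excluded by Pre_, so the 0 default is never hit there)
def pvLookup (t : List (String × Int)) (k : String) : Int :=
  ((t.find? (fun p => p.1 == k)).map Prod.snd).getD 0

-- ===== PORT A =====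
def generate_spectrum (peptide : String) (int_mw_table : List (String × Int)) (cyclic : Bool) : List Int :=
  let pep : List Int := peptide.toList.map (fun c => pvLookup int_mw_table (String.ofList [c]))
  -- prefix_mass = [0]; for amino_acid in peptide: prefix_mass.append(prefix_mass[-1] + int(amino_acid))
  let prefix_mass : List Int := pep.foldl (fun pm a => pm ++ [PySem.List.pyGetD pm (-1) 0 + a]) [0]
  let peptide_mass : Int := PySem.List.pyGetD prefix_mass (-1) 0
  let n : Nat := pep.length
  -- for i in range(n): for j in range(i+1, n+1): …   (prefix_mass[i], prefix_mass[j] are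
  -- nonnegative in-range indices, so List.getD is exact there)
  (List.range n).foldl (fun spectrum i =>
    (List.range' (i + 1) (n - i)).foldl (fun sp j =>
      let sequence_mass : Int := prefix_mass.getD j 0 - prefix_mass.getD i 0
      let sp := sp ++ [sequence_mass]
      if cyclic && decide (0 < i) && decide (j < n) then sp ++ [peptide_mass - sequence_mass] else sp)
      spectrum) [0]

-- ===== PORT B =====
-- B's inner while loop: running sum acc over the suffix, emitting each partial sum and,
-- when cyclic and not the first row and the suffix is not exhausted, its complement
def pvRow (cyclic : Bool) (total : Int) (isFirst : Bool) : Int → List Int → List Int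
  | _, [] => []
  | acc, m :: rest =>
    (acc + m) ::
      ((if cyclic && !isFirst && !rest.isEmpty then [total - (acc + m)] else []) ++
        pvRow cyclic total isFirst (acc + m) rest)

-- B's recursion over the suffixes of the mass list
def pvRows (cyclic : Bool) (total : Int) : List Int → Bool → List Int
  | [], _ => []
  | m :: rest, isFirst => pvRow cyclic total isFirst 0 (m :: rest) ++ pvRows cyclic total rest false

def generate_spectrum_alt (peptide : String) (int_mw_table : List (String × Int)) (cyclic : Bool) : List Int :=
  let masses : List Int := peptide.toList.map (fun c => pvLookup int_mw_table (String.ofList [c]))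
  let total : Int := masses.sum
  0 :: pvRows cyclic total masses true

-- ===== PRECONDITION & SPEC =====
-- Pre_ excludes exactly the inputs where Python A raises KeyError: a peptide letter absent
-- from the mass table (B raises there too).
def Pre_generate_spectrum (peptide : String) (int_mw_table : List (String × Int)) (cyclic : Bool) : Prop :=
  (peptide.toList.all (fun c => int_mw_table.any (fun q => q.1.toList == [c]))) = true
instance (peptide : String) (int_mw_table : List (String × Int)) (cyclic : Bool) : Decidable (Pre_generate_spectrum peptide int_mw_table cyclic) := by unfold Pre_generate_spectrum; infer_instance

def pvWitness_generate_spectrum : String × (List (String × Int)) × Bool :=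
  ("NQ", [("N", 114), ("Q", 128)], true)

def Spec_generate_spectrum (peptide : String) (int_mw_table : List (String × Int)) (cyclic : Bool) (out : List Int) : Prop := out = generate_spectrum_alt peptide int_mw_table cyclic
instance (peptide : String) (int_mw_table : List (String × Int)) (cyclic : Bool) (out : List Int) : Decidable (Spec_generate_spectrum peptide int_mw_table cyclic out) := by unfold Spec_generate_spectrum; infer_instance

-- ===== CLAIM (what is proved, stated in full; the proofs are below) =====
def Claim_equal_generate_spectrum : Prop := ∀ (peptide : String) (int_mw_table : List (String × Int)) (cyclic : Bool), Dom_generate_spectrum peptide int_mw_table cyclic → Pre_generate_spectrum peptide int_mw_table cyclic → Spec_generate_spectrum peptide int_mw_table cyclic (generate_spectrum peptide int_mw_table cyclic)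

-- ===== LEMMAS AND PROOFS =====

-- A's append loop builds exactly the running-sum scan
theorem pvPrefixFold (l : List Int) (pre : List Int) (x : Int) :
    l.foldl (fun pm a => pm ++ [PySem.List.pyGetD pm (-1) 0 + a]) (pre ++ [x])
      = pre ++ l.scanl (· + ·) x := by
  induction l generalizing pre x with
  | nil => simp
  | cons a l ih =>
    simp only [List.foldl_cons, PySem.List.pyGetD_neg_one_append_singleton, List.scanl_cons]
    have : pre ++ [x] ++ [x + a] = (pre ++ [x]) ++ [x + a] := by simp
    rw [this, ih (pre ++ [x]) (x + a)]
    simp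

theorem pvScanlGetD (l : List Int) (x : Int) (j : Nat) (hj : j ≤ l.length) :
    (l.scanl (· + ·) x).getD j 0 = x + (l.take j).sum := by
  induction l generalizing x j with
  | nil =>
    have : j = 0 := by simpa using hj
    subst this; simp
  | cons a l ih =>
    cases j with
    | zero => simp
    | succ j =>
      simp only [List.scanl_cons, List.getD_cons_succ, List.take_succ_cons, List.sum_cons]
      rw [ih (x + a) j (by simpa using hj)]
      ring

theorem pvScanlLast (l : List Int) (x : Int) :
    PySem.List.pyGetD (l.scanl (· + ·) x) (-1) 0 = x + l.sum := by
  induction l generalizing x with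
  | nil => simp [PySem.List.pyGetD, PySem.List.pyGet?, PySem.List.pyIdx?]
  | cons a l ih =>
    have hne2 : l.scanl (· + ·) (x + a) ≠ [] := by cases l <;> simp
    have hne : (a :: l).scanl (· + ·) x ≠ [] := by simp
    rw [PySem.List.pyGetD_neg_one _ _ hne]
    simp only [List.scanl_cons]
    rw [List.getLast_cons hne2, ← PySem.List.pyGetD_neg_one _ 0 hne2, ih (x + a)]
    simp [List.sum_cons]; ring

theorem pvSliceSum (l : List Int) (i j : Nat) (hij : i ≤ j) (hj : j ≤ l.length) :
    (l.take j).sum - (l.take i).sum = ((l.drop i).take (j - i)).sum := by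
  have h : l.take j = l.take i ++ (l.drop i).take (j - i) := by
    rw [← List.take_add]; congr 1; omega
  rw [h, List.sum_append]; ring

theorem pvFlatMapCongrMem {α β : Type} (l : List α) (f g : α → List β)
    (h : ∀ x ∈ l, f x = g x) : l.flatMap f = l.flatMap g := by
  induction l with
  | nil => rfl
  | cons a l ih =>
    simp only [List.flatMap_cons]
    rw [h a (by simp), ih (fun x hx => h x (by simp [hx]))]

-- B's inner running-sum recursion, characterised by positions
theorem pvRowEq (c : Bool) (t : Int) (f : Bool) (l : List Int) (acc : Int) :
    pvRow c t f acc l = (List.range l.length).flatMap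
      (fun k => (acc + (l.take (k+1)).sum) ::
        (if c && !f && decide (k+1 < l.length) then [t - (acc + (l.take (k+1)).sum)] else [])) := by
  induction l generalizing acc with
  | nil => simp [pvRow]
  | cons m rest ih =>
    simp only [pvRow, List.length_cons, List.range_succ_eq_map, List.flatMap_cons,
      List.flatMap_map]
    rw [ih (acc + m)]
    have hfun : (fun k => ((acc + m) + (rest.take (k+1)).sum) ::
        (if c && !f && decide (k+1 < rest.length) then [t - ((acc + m) + (rest.take (k+1)).sum)] else []))
        = (fun k => (acc + ((m :: rest).take (k+1+1)).sum) ::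
          (if c && !f && decide (k+1+1 < rest.length + 1) then [t - (acc + ((m :: rest).take (k+1+1)).sum)] else [])) := by
      funext k
      have ht : (m :: rest).take (k+1+1) = m :: rest.take (k+1) := by simp
      have hd : (decide (k+1+1 < rest.length + 1)) = decide (k+1 < rest.length) := by
        simp
      rw [ht, hd]
      simp [List.sum_cons]; constructor <;> ring_nf
    rw [hfun]
    simp [List.sum_cons, List.length_pos_iff]

-- B's suffix recursion, characterised by start index
theorem pvRowsEq (c : Bool) (t : Int) (l : List Int) (b : Bool) :
    pvRows c t l b = (List.range l.length).flatMap
      (fun i => pvRow c t (b && decide (i = 0)) 0 (l.drop i)) := by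
  induction l generalizing b with
  | nil => simp [pvRows]
  | cons m rest ih =>
    simp only [pvRows, List.length_cons, List.range_succ_eq_map, List.flatMap_cons,
      List.flatMap_map]
    rw [ih false]
    simp

theorem generate_spectrum_spec : Claim_equal_generate_spectrum := by
  intro peptide int_mw_table cyclic _ _
  unfold Spec_generate_spectrum generate_spectrum generate_spectrum_alt
  simp only []
  set pep : List Int := peptide.toList.map (fun c => pvLookup int_mw_table (String.ofList [c])) with hpep
  set n : Nat := pep.length with hn
  -- A's prefix table is the running-sum scan, its last entry the total mass
  have hprefix : pep.foldl (fun pm a => pm ++ [PySem.List.pyGetD pm (-1) 0 + a]) [0]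
      = pep.scanl (· + ·) 0 := by
    have := pvPrefixFold pep [] 0
    simpa using this
  rw [hprefix]
  have hmass : PySem.List.pyGetD (pep.scanl (· + ·) 0) (-1) 0 = pep.sum := by
    rw [pvScanlLast]; ring
  rw [hmass]
  -- A's inner append loop over j is an extend by a flatMap
  have hinner : ∀ (i : Nat) (spectrum : List Int),
      (List.range' (i + 1) (n - i)).foldl (fun sp j =>
        let sequence_mass : Int := (pep.scanl (· + ·) 0).getD j 0 - (pep.scanl (· + ·) 0).getD i 0
        let sp := sp ++ [sequence_mass]
        if cyclic && decide (0 < i) && decide (j < n) then sp ++ [pep.sum - sequence_mass] else sp)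
        spectrum
      = spectrum ++ (List.range' (i + 1) (n - i)).flatMap (fun j =>
          ((pep.scanl (· + ·) 0).getD j 0 - (pep.scanl (· + ·) 0).getD i 0) ::
            (if cyclic && decide (0 < i) && decide (j < n)
             then [pep.sum - ((pep.scanl (· + ·) 0).getD j 0 - (pep.scanl (· + ·) 0).getD i 0)]
             else [])) := by
    intro i spectrum
    have hf : (fun (sp : List Int) (j : Nat) =>
        let sequence_mass : Int := (pep.scanl (· + ·) 0).getD j 0 - (pep.scanl (· + ·) 0).getD i 0
        let sp := sp ++ [sequence_mass]
        if cyclic && decide (0 < i) && decide (j < n) then sp ++ [pep.sum - sequence_mass] else sp)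
        = (fun (sp : List Int) (j : Nat) => sp ++
            (((pep.scanl (· + ·) 0).getD j 0 - (pep.scanl (· + ·) 0).getD i 0) ::
              (if cyclic && decide (0 < i) && decide (j < n)
               then [pep.sum - ((pep.scanl (· + ·) 0).getD j 0 - (pep.scanl (· + ·) 0).getD i 0)]
               else []))) := by
      funext sp j
      simp only []
      split_ifs <;> simp
    rw [hf]
    exact PySem.List.foldl_append_eq_flatMap _ _ _
  -- so A's nested loops are nested flatMaps
  have hA : (List.range n).foldl (fun spectrum i =>
      (List.range' (i + 1) (n - i)).foldl (fun sp j =>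
        let sequence_mass : Int := (pep.scanl (· + ·) 0).getD j 0 - (pep.scanl (· + ·) 0).getD i 0
        let sp := sp ++ [sequence_mass]
        if cyclic && decide (0 < i) && decide (j < n) then sp ++ [pep.sum - sequence_mass] else sp)
        spectrum) [0]
      = [0] ++ (List.range n).flatMap (fun i => (List.range' (i + 1) (n - i)).flatMap (fun j =>
          ((pep.scanl (· + ·) 0).getD j 0 - (pep.scanl (· + ·) 0).getD i 0) ::
            (if cyclic && decide (0 < i) && decide (j < n)
             then [pep.sum - ((pep.scanl (· + ·) 0).getD j 0 - (pep.scanl (· + ·) 0).getD i 0)]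
             else []))) := by
    have hg : (fun (spectrum : List Int) (i : Nat) =>
        (List.range' (i + 1) (n - i)).foldl (fun sp j =>
          let sequence_mass : Int := (pep.scanl (· + ·) 0).getD j 0 - (pep.scanl (· + ·) 0).getD i 0
          let sp := sp ++ [sequence_mass]
          if cyclic && decide (0 < i) && decide (j < n) then sp ++ [pep.sum - sequence_mass] else sp)
          spectrum)
        = (fun (spectrum : List Int) (i : Nat) => spectrum ++
            (List.range' (i + 1) (n - i)).flatMap (fun j =>
              ((pep.scanl (· + ·) 0).getD j 0 - (pep.scanl (· + ·) 0).getD i 0) ::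
                (if cyclic && decide (0 < i) && decide (j < n)
                 then [pep.sum - ((pep.scanl (· + ·) 0).getD j 0 - (pep.scanl (· + ·) 0).getD i 0)]
                 else []))) := by
      funext spectrum i
      exact hinner i spectrum
    rw [hg]
    exact PySem.List.foldl_append_eq_flatMap _ _ _
  rw [hA]
  -- B's recursions expand to the same nested flatMaps
  rw [pvRowsEq, ← hn]
  rw [List.singleton_append]
  apply congrArg (List.cons 0)
  apply pvFlatMapCongrMem
  intro i hi
  rw [List.mem_range] at hi
  -- expand B's row at start i
  rw [pvRowEq]
  have hdl : (pep.drop i).length = n - i := by simp [hn]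
  rw [hdl]
  -- reindex A's inner range' over offsets
  rw [List.range'_eq_map_range, List.flatMap_map]
  apply pvFlatMapCongrMem
  intro k hk
  rw [List.mem_range] at hk
  have hgj : (pep.scanl (· + ·) 0).getD (i + 1 + k) 0 = 0 + (pep.take (i + 1 + k)).sum :=
    pvScanlGetD pep 0 _ (by omega)
  have hgi : (pep.scanl (· + ·) 0).getD i 0 = 0 + (pep.take i).sum :=
    pvScanlGetD pep 0 _ (by omega)
  have hs : (pep.scanl (· + ·) 0).getD (i + 1 + k) 0 - (pep.scanl (· + ·) 0).getD i 0
      = 0 + ((pep.drop i).take (k + 1)).sum := by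
    rw [hgj, hgi]
    have h2 := pvSliceSum pep i (i + 1 + k) (by omega) (by omega)
    have he : i + 1 + k - i = k + 1 := by omega
    rw [he] at h2
    omega
  have hcond : (decide (i + 1 + k < n)) = decide (k + 1 < n - i) := by
    by_cases h : i + 1 + k < n
    · simp [h, show k + 1 < n - i by omega]
    · simp [h, show ¬ (k + 1 < n - i) by omega]
  have hfirst : (decide (0 < i)) = !(true && decide (i = 0)) := by
    cases i <;> simp
  rw [hs, hcond, hfirst]
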